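-- pv_equiv track=rewrite | github.com/chronometer/ratkomo_ifrs_deep | src/utils/text_processor.py | estimate_page_numbers
-- ===== SOURCE A (Python) =====
-- from typing import List, Tuple
--
-- def estimate_page_numbers(text: str, chars_per_page: int = 3000) -> List[int]:
--     """Estimate page numbers for text segments"""
--     pages = []
--     total_chars = 0
--
--     paragraphs = text.split('\n\n')
--     for para in paragraphs:
--         total_chars += len(para)
--         pages.append(total_chars // chars_per_page)
--
--     return pages
-- ===== SOURCE B (Python) =====
-- from typing import List
--
-- def estimate_page_numbers(text: str, chars_per_page: int = 3000) -> List[int]: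
--     """Estimate page numbers for text segments"""
--     pages = []
--     k = 0
--     pos = text.find('\n\n')
--     while pos != -1:
--         pages.append((pos - 2 * k) // chars_per_page)
--         k += 1
--         pos = text.find('\n\n', pos + 2)
--     pages.append((len(text) - 2 * k) // chars_per_page)
--     return pages
-- ===== Notes on version B (the rewrite author's own statement) =====
-- stated objective: alternative
-- what changed: B never splits the text or sums paragraph lengths: it scans the raw string with str.find for the positions of the two-newline paragraph separator and derives each cumulative character total arithmetically as (separator position minus twice the number of separators already seen), appending the final total from len(text).
import Mathlib
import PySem

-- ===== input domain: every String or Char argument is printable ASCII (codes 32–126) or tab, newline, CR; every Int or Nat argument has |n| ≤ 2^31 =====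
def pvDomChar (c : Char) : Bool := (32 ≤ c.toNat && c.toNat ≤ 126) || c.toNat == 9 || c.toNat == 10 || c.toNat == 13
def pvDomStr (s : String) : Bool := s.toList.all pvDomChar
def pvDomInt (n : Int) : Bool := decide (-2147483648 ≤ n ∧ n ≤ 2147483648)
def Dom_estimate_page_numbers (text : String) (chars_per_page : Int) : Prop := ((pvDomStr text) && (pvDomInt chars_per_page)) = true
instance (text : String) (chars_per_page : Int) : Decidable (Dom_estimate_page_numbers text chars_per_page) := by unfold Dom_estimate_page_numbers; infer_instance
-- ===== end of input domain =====

-- B never splits the text: it scans for the '\n\n' separator positions with str.find and derives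
-- each cumulative character total arithmetically as (position - 2*k); objective: alternative.

-- ===== PORT A =====
-- split into paragraphs, then one fused loop: state = (pages, total_chars)
def estimate_page_numbers (text : String) (chars_per_page : Int) : List Int :=
  let paragraphs := (PySem.Str.split? text "\n\n").getD []
  (paragraphs.foldl
    (fun (st : List Int × Int) para =>
      let total := st.2 + (PySem.Str.len para : Int)
      (st.1 ++ [PySem.Int.floordiv total chars_per_page], total))
    ([], 0)).1

-- ===== PORT B =====
-- the while loop of Source B: state = (pages, k, pos); fuel = len(text)+1 (pos advances by ≥ 2 per iteration)
def epnLoop (text : String) (chars_per_page : Int) : Nat → List Int → Int → Int → List Int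
  | 0, pages, _, _ => pages   -- fuel never exhausted
  | fuel+1, pages, k, pos =>
    if pos = -1 then
      pages ++ [PySem.Int.floordiv ((PySem.Str.len text : Int) - 2*k) chars_per_page]
    else
      epnLoop text chars_per_page fuel
        (pages ++ [PySem.Int.floordiv (pos - 2*k) chars_per_page])
        (k+1) (PySem.Str.findFrom text "\n\n" (pos+2) none)

def estimate_page_numbers_alt (text : String) (chars_per_page : Int) : List Int :=
  epnLoop text chars_per_page (text.toList.length + 1) [] 0 (PySem.Str.find text "\n\n")

-- ===== PRECONDITION & SPEC =====
-- Pre_ excludes chars_per_page = 0, where A (and B) raise ZeroDivisionError.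
def Pre_estimate_page_numbers (_text : String) (chars_per_page : Int) : Prop := chars_per_page ≠ 0
instance (text : String) (chars_per_page : Int) : Decidable (Pre_estimate_page_numbers text chars_per_page) := by unfold Pre_estimate_page_numbers; infer_instance
def pvWitness_estimate_page_numbers : String × Int := ("ab\n\ncd", 3)

def Spec_estimate_page_numbers (text : String) (chars_per_page : Int) (out : List Int) : Prop := out = estimate_page_numbers_alt text chars_per_page
instance (text : String) (chars_per_page : Int) (out : List Int) : Decidable (Spec_estimate_page_numbers text chars_per_page out) := by unfold Spec_estimate_page_numbers; infer_instance

-- ===== CLAIM (what is proved, stated in full; the proofs are below) =====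
def Claim_equal_estimate_page_numbers : Prop := ∀ (text : String) (chars_per_page : Int), Dom_estimate_page_numbers text chars_per_page → Pre_estimate_page_numbers text chars_per_page → Spec_estimate_page_numbers text chars_per_page (estimate_page_numbers text chars_per_page)

-- ===== LEMMAS AND PROOFS =====

-- prefix sums (proof-side helper: the cumulative totals both programs realise)
def pvAccumulate (acc : Int) : List Int → List Int
  | [] => []
  | x :: xs => (acc + x) :: pvAccumulate (acc + x) xs

-- A's fused fold is the divided prefix sums of the paragraph lengths
theorem pv_fold_accum (cpp : Int) (ps : List String) (pages : List Int) (acc : Int) :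
    (ps.foldl
      (fun (st : List Int × Int) para =>
        (st.1 ++ [PySem.Int.floordiv (st.2 + (PySem.Str.len para : Int)) cpp],
         st.2 + (PySem.Str.len para : Int)))
      (pages, acc)).1
    = pages ++ (pvAccumulate acc (ps.map (fun p => (p.toList.length : Int)))).map
        (fun total => PySem.Int.floordiv total cpp) := by
  induction ps generalizing pages acc with
  | nil => simp [pvAccumulate]
  | cons p ps ih =>
      simp only [List.foldl_cons, List.map_cons, pvAccumulate, PySem.Str.len_eq]
      simp only [PySem.Str.len_eq] at ih
      rw [ih]
      simp

-- find s sep = k whenever sep occurs at k and at no earlier position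
theorem pv_find_eq (l sep : List Char) (k : Nat) (h1 : sep <+: l.drop k)
    (h2 : ∀ i < k, ¬ sep <+: l.drop i) : PySem.Chars.find l sep = (k : Int) := by
  have hinf : sep <:+: l := by
    rw [← PySem.Chars.isIn_iff_infix, ← PySem.Chars.exists_prefix_drop_iff_isIn]
    exact ⟨k, h1⟩
  have hnn : 0 ≤ PySem.Chars.find l sep := (PySem.Chars.find_nonneg_iff l sep).2 hinf
  obtain ⟨hpre, hmin⟩ := PySem.Chars.find_spec hnn
  have hk1 : ¬ ((PySem.Chars.find l sep).toNat < k) := fun h => h2 _ h hpre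
  have hk2 : ¬ (k < (PySem.Chars.find l sep).toNat) := fun h => hmin _ h h1
  omega

-- the first step of splitOn is the first occurrence found by find
theorem pv_go_spec (sep : List Char) (hsep : sep ≠ []) :
    ∀ n (l : List Char), l.length = n → ∀ fuel, n < fuel → ∀ (cur : List Char) (acc : List (List Char)),
    PySem.Chars.splitOn.go sep fuel l cur acc =
      acc.reverse ++ (if PySem.Chars.find l sep = -1 then [cur.reverse ++ l]
        else (cur.reverse ++ l.take (PySem.Chars.find l sep).toNat) ::
             PySem.Chars.splitOn (l.drop ((PySem.Chars.find l sep).toNat + sep.length)) sep) := by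
  have hiff : ∀ s : List Char, sep <:+: s ↔ ∃ j, sep <+: s.drop j := fun s => by
    rw [← PySem.Chars.isIn_iff_infix, ← PySem.Chars.exists_prefix_drop_iff_isIn]
  intro n
  induction n using Nat.strong_induction_on with
  | _ n IH =>
    intro l hl fuel hfuel cur acc
    match l, fuel with
    | [], fuel+1 =>
      have hfind : PySem.Chars.find [] sep = -1 := by
        rw [PySem.Chars.find_eq_neg_one_iff]
        simp [List.infix_nil, hsep]
      rw [PySem.Chars.splitOn.go.eq_def]
      simp [hfind]
    | c :: rest, fuel+1 =>
      have hsl : 0 < sep.length := List.length_pos_iff.mpr hsep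
      rw [PySem.Chars.splitOn.go.eq_def]
      simp only []
      by_cases hp : sep.isPrefixOf (c :: rest)
      · have hpre : sep <+: (c :: rest) := List.isPrefixOf_iff_prefix.mp hp
        have hfind : PySem.Chars.find (c :: rest) sep = 0 := by
          have := pv_find_eq (c :: rest) sep 0 (by simpa using hpre) (by omega)
          simpa using this
        have hlc : rest.length + 1 = n := by simpa using hl
        have hlen' : (List.drop sep.length (c :: rest)).length < n := by
          simp only [List.length_drop, List.length_cons]; omega
        have h1 := IH _ hlen' (List.drop sep.length (c :: rest)) rfl fuel
          (by simp only [List.length_drop, List.length_cons]; omega) [] (cur.reverse :: acc)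
        have h2 := IH _ hlen' (List.drop sep.length (c :: rest)) rfl
          ((List.drop sep.length (c :: rest)).length + 1) (by omega) [] []
        rw [if_pos hp, h1, hfind]
        have h2' : PySem.Chars.splitOn (List.drop sep.length (c :: rest)) sep
            = (if PySem.Chars.find (List.drop sep.length (c :: rest)) sep = -1 then
                [List.drop sep.length (c :: rest)]
              else
                (List.take (PySem.Chars.find (List.drop sep.length (c :: rest)) sep).toNat
                  (List.drop sep.length (c :: rest))) ::
                  PySem.Chars.splitOn
                    (List.drop ((PySem.Chars.find (List.drop sep.length (c :: rest)) sep).toNat + sep.length)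
                      (List.drop sep.length (c :: rest))) sep) := by
          have hdef : PySem.Chars.splitOn (List.drop sep.length (c :: rest)) sep
              = PySem.Chars.splitOn.go sep ((List.drop sep.length (c :: rest)).length + 1)
                (List.drop sep.length (c :: rest)) [] [] := rfl
          rw [hdef, h2]; simp
        simp [h2']
      · have hnp : ¬ sep <+: (c :: rest) := fun h => hp (List.isPrefixOf_iff_prefix.mpr h)
        have hlc : rest.length + 1 = n := by simpa using hl
        have hlen' : rest.length < n := by omega
        have h1 := IH _ hlen' rest rfl fuel (by omega) (c :: cur) acc
        rw [if_neg hp, h1]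
        by_cases hr : sep <:+: rest
        · have hrnn : 0 ≤ PySem.Chars.find rest sep := (PySem.Chars.find_nonneg_iff rest sep).2 hr
          obtain ⟨hrpre, hrmin⟩ := PySem.Chars.find_spec hrnn
          set t := (PySem.Chars.find rest sep).toNat with ht
          have hfind : PySem.Chars.find (c :: rest) sep = ((t + 1 : Nat) : Int) := by
            apply pv_find_eq
            · simpa using hrpre
            · intro i hi
              match i with
              | 0 => simpa using hnp
              | j+1 =>
                have hj : j < t := by omega
                simpa using hrmin j hj
          have hrfind : PySem.Chars.find rest sep ≠ -1 := by omega
          have htv : PySem.Chars.find rest sep = (t : Int) := by omega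
          rw [hfind, htv]
          have hne : ((t + 1 : Nat) : Int) ≠ -1 := by omega
          rw [if_neg hne, if_neg (by omega : ¬ (t : Int) = -1)]
          simp [List.take_succ_cons]
          rw [show t + 1 + sep.length = (t + sep.length) + 1 by omega, List.drop_succ_cons]
        · have hrfind : PySem.Chars.find rest sep = -1 :=
            (PySem.Chars.find_eq_neg_one_iff rest sep).2 hr
          have hfind : PySem.Chars.find (c :: rest) sep = -1 := by
            rw [PySem.Chars.find_eq_neg_one_iff]
            intro h
            obtain ⟨j, hj⟩ := (hiff _).1 h
            match j with
            | 0 => exact hnp (by simpa using hj)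
            | j+1 => exact hr ((hiff rest).2 ⟨j, by simpa using hj⟩)
          rw [hrfind, hfind]
          simp

theorem pv_splitOn_find (sep : List Char) (hsep : sep ≠ []) (l : List Char) :
    PySem.Chars.splitOn l sep =
      if PySem.Chars.find l sep = -1 then [l]
      else l.take (PySem.Chars.find l sep).toNat ::
           PySem.Chars.splitOn (l.drop ((PySem.Chars.find l sep).toNat + sep.length)) sep := by
  have := pv_go_spec sep hsep l.length l rfl (l.length + 1) (by omega) [] []
  simpa [PySem.Chars.splitOn] using this

-- B's while loop computes the divided prefix sums of the remaining paragraphs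
theorem pv_loop_spec (text : String) (cpp : Int) :
    ∀ fuel (posN k : Nat) (pages : List Int),
    posN ≤ text.toList.length → text.toList.length - posN < fuel →
    epnLoop text cpp fuel pages (k : Int) (PySem.Chars.findFrom text.toList ['\n','\n'] (posN : Int) none) =
      pages ++ (pvAccumulate ((posN : Int) - 2*k)
        ((PySem.Chars.splitOn (text.toList.drop posN) ['\n','\n']).map (fun p => (p.length : Int)))).map
        (fun total => PySem.Int.floordiv total cpp) := by
  intro fuel
  induction fuel with
  | zero => intro posN k pages hpos hfuel; omega
  | succ fuel ih =>
    intro posN k pages hpos hfuel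
    rw [PySem.Chars.findFrom_natCast text.toList ['\n','\n'] posN hpos]
    by_cases h : PySem.Chars.find (text.toList.drop posN) ['\n','\n'] = -1
    · rw [if_pos h, pv_splitOn_find ['\n','\n'] (by simp) (text.toList.drop posN), if_pos h]
      simp only [epnLoop, List.map_cons, List.map_nil, pvAccumulate,
        List.length_drop]
      have : (PySem.Str.len text : Int) - 2*(k : Int)
          = (posN : Int) - 2*(k : Int) + ((text.toList.length - posN : Nat) : Int) := by
        rw [PySem.Str.len_eq]
        have : ((text.toList.length - posN : Nat) : Int) = (text.toList.length : Int) - posN := by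
          omega
        omega
      rw [this]
      simp
    · have hq : 0 ≤ PySem.Chars.find (text.toList.drop posN) ['\n','\n'] := by
        have := PySem.Chars.neg_one_le_find (text.toList.drop posN) ['\n','\n']
        omega
      obtain ⟨hpre, _⟩ := PySem.Chars.find_spec hq
      set qN := (PySem.Chars.find (text.toList.drop posN) ['\n','\n']).toNat with hqdef
      have htv : PySem.Chars.find (text.toList.drop posN) ['\n','\n'] = (qN : Int) := by omega
      have hlenb : qN + 2 ≤ text.toList.length - posN := by
        have h1 := hpre.length_le
        simp only [List.length_drop] at h1
        have h2 : ((['\n','\n'] : List Char)).length = 2 := by simp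
        omega
      rw [if_neg h, htv]
      have harg : ((posN : Int) + (qN : Int) ≠ -1) := by omega
      simp only [epnLoop, if_neg harg]
      have hposcast : (posN : Int) + (qN : Int) + 2 = ((posN + qN + 2 : Nat) : Int) := by push_cast; ring
      have hsep : ("\n\n" : String).toList = ['\n','\n'] := by decide
      rw [PySem.Str.findFrom_eq, hsep, hposcast]
      have hk1 : (k : Int) + 1 = ((k + 1 : Nat) : Int) := by push_cast; ring
      rw [hk1, ih (posN + qN + 2) (k + 1) _ (by omega) (by omega)]
      rw [pv_splitOn_find ['\n','\n'] (by simp) (text.toList.drop posN), if_neg h, htv,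
        Int.toNat_natCast]
      have hsl2 : ((['\n','\n'] : List Char)).length = 2 := by simp
      rw [hsl2]
      have htake : (List.take qN (text.toList.drop posN)).length = qN := by
        simp only [List.length_take, List.length_drop]
        omega
      have hdd : List.drop (qN + 2) (text.toList.drop posN) = List.drop (posN + qN + 2) text.toList := by
        rw [List.drop_drop, show posN + (qN + 2) = posN + qN + 2 by omega]
      simp only [List.map_cons, pvAccumulate, htake, hdd]
      have hbase1 : (posN : Int) - 2*(k : Int) + (qN : Int) = (posN : Int) + (qN : Int) - 2*(k : Int) := by ring
      have hbase2 : ((posN + qN + 2 : Nat) : Int) - 2*((k + 1 : Nat) : Int)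
          = (posN : Int) - 2*(k : Int) + (qN : Int) := by push_cast; ring
      rw [hbase1, hbase2, hbase1]
      simp

-- ===== VERDICT (by name: the statement is the Claim_ definition above) =====
theorem estimate_page_numbers_spec : Claim_equal_estimate_page_numbers := by
  intro text cpp _ _
  unfold Spec_estimate_page_numbers estimate_page_numbers estimate_page_numbers_alt
  have hsep : ("\n\n" : String).toList = ['\n','\n'] := by decide
  have hsplit := PySem.Str.split?_map text "\n\n"
  rw [hsep] at hsplit
  rw [show PySem.Chars.split? text.toList ['\n','\n']
      = some (PySem.Chars.splitOn text.toList ['\n','\n']) from by simp [PySem.Chars.split?]] at hsplit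
  cases e : PySem.Str.split? text "\n\n" with
  | none => rw [e] at hsplit; simp at hsplit
  | some ps =>
    rw [e] at hsplit
    have hps : ps.map String.toList = PySem.Chars.splitOn text.toList ['\n','\n'] := by
      simpa using hsplit
    have hB := pv_loop_spec text cpp (text.toList.length + 1) 0 0 [] (Nat.zero_le _) (by omega)
    have hfind0 : PySem.Str.find text "\n\n"
        = PySem.Chars.findFrom text.toList ['\n','\n'] ((0 : Nat) : Int) none := by
      rw [PySem.Str.find_eq, hsep]
      exact (PySem.Chars.findFrom_zero text.toList ['\n','\n']).symm
    rw [hfind0, show ((0 : Nat) : Int) = (0 : Int) from rfl] at *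
    rw [hB]
    have hA := pv_fold_accum cpp ps [] 0
    rw [Option.getD_some, hA]
    have hmm : ps.map (fun p : String => (p.length : Int))
        = (PySem.Chars.splitOn text.toList ['\n','\n']).map (fun p => (p.length : Int)) := by
      rw [← hps, List.map_map]
      simp [Function.comp]
    simp [hmm]
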